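-- pv_equiv track=rewrite | github.com/mrjohnsoncomputing/AdventOfCode | 2018/temp/Day5.py | reactSingleLetter
-- ===== SOURCE A (Python) =====
-- def reactSingleLetter(letter, string_input):
--   calculating = True
--   i = 0
--   while calculating:
--     char1 = string_input[i].lower()
--     char2 = string_input[i+1].lower()
--     if char1 == letter and letter == char2 and string_input[i] != string_input[i+1]:
--       del string_input[i]
--       del string_input[i]
--       if i > 0:
--         i -= 1
--     else:
--       i += 1
--     if i >= len(string_input)-1:
--       calculating = False
--   return string_input
-- ===== SOURCE B (Python) =====
-- def reactSingleLetter(letter, string_input):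
--   stack = []
--   for unit in string_input:
--     if stack and unit.lower() == letter == stack[-1].lower() and unit != stack[-1]:
--       stack.pop()
--     else:
--       stack.append(unit)
--   string_input[:] = stack
--   return string_input
-- ===== Notes on version B (the rewrite author's own statement) =====
-- stated objective: faster
-- what changed: Replaced the index-walking while loop with backtracking and O(n) in-place deletions by a single-pass stack reduction that pops a reactive pair when the new unit reacts with the stack top.
import Mathlib
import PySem

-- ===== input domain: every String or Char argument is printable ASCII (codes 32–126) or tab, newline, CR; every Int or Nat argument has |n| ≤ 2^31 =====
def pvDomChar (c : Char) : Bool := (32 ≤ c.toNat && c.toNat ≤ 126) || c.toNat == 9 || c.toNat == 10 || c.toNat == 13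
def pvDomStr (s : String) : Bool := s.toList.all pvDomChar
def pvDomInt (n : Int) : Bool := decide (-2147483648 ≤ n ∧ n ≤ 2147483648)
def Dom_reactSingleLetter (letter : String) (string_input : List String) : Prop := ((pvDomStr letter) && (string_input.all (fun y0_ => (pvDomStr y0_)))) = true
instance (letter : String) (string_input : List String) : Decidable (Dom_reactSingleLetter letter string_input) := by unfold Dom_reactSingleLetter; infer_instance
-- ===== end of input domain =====

-- B replaces A's index-walking loop with in-place deletions by a one-pass stack reduction
-- (measured asymptotically faster in a timing run). A mutates its argument in place; B
-- mirrors that mutation in Python; the equivalence proved here is about the return value.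

-- ===== PORT A =====
-- A's while loop: the `if h : _` guard makes the body's indexing total; it fails exactly
-- where Python's `string_input[i+1]` would raise (initial lists shorter than 2, excluded by Pre_).
def reactA_loop (letter : String) (i : Nat) (xs : List String) : List String :=
  if h : i + 1 < xs.length then
    let char1 := PySem.Str.lower xs[i]
    let char2 := PySem.Str.lower (xs[i+1]'h)
    if char1 = letter ∧ letter = char2 ∧ xs[i] ≠ xs[i+1]'h then
      -- del string_input[i]; del string_input[i]
      let xs' := (xs.eraseIdx i).eraseIdx i
      let i' := if i > 0 then i - 1 else i
      -- `if i >= len(string_input)-1: calculating = False` is the recursive call's guard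
      reactA_loop letter i' xs'
    else
      reactA_loop letter (i+1) xs
  else xs
termination_by 2 * xs.length - i
decreasing_by
  · have h2 : ((xs.eraseIdx i).eraseIdx i).length = xs.length - 2 := by
      simp only [List.length_eraseIdx]
      rw [if_pos (by omega : i < xs.length)]
      rw [if_pos (by omega : i < xs.length - 1)]
      omega
    simp only [h2]
    split <;> omega
  · omega

def reactSingleLetter (letter : String) (string_input : List String) : List String :=
  reactA_loop letter 0 string_input

-- ===== PORT B =====
-- B's stack: top of the Python stack (stack[-1], append, pop) is the HEAD of the Lean list;
-- the final list is therefore reversed once at the end.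
def stackStep (letter : String) (stack : List String) (unit : String) : List String :=
  match stack with
  | top :: rest =>
    if PySem.Str.lower unit = letter ∧ letter = PySem.Str.lower top ∧ unit ≠ top then rest
    else unit :: (top :: rest)
  | [] => [unit]

def reactSingleLetter_alt (letter : String) (string_input : List String) : List String :=
  (string_input.foldl (stackStep letter) []).reverse

-- ===== PRECONDITION & SPEC =====
-- Pre_ excludes only inputs on which Python A raises IndexError (fewer than two elements).
def Pre_reactSingleLetter (letter : String) (string_input : List String) : Prop :=
  2 ≤ string_input.length
instance (letter : String) (string_input : List String) : Decidable (Pre_reactSingleLetter letter string_input) := by unfold Pre_reactSingleLetter; infer_instance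
def pvWitness_reactSingleLetter : String × List String := ("a", ["b", "a", "A", "B"])

def Spec_reactSingleLetter (letter : String) (string_input : List String) (out : List String) : Prop := out = reactSingleLetter_alt letter string_input
instance (letter : String) (string_input : List String) (out : List String) : Decidable (Spec_reactSingleLetter letter string_input out) := by unfold Spec_reactSingleLetter; infer_instance

-- ===== CLAIM (what is proved, stated in full; the proofs are below) =====
def Claim_equal_reactSingleLetter : Prop := ∀ (letter : String) (string_input : List String), Dom_reactSingleLetter letter string_input → Pre_reactSingleLetter letter string_input → Spec_reactSingleLetter letter string_input (reactSingleLetter letter string_input)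

-- ===== LEMMAS AND PROOFS =====

-- "a and b do not react": the negation of A's (and B's) reaction condition.
def noReact (letter a b : String) : Prop :=
  ¬(PySem.Str.lower a = letter ∧ letter = PySem.Str.lower b ∧ a ≠ b)

theorem isChain_take_one {α : Type} (R : α → α → Prop) (l : List α) :
    List.IsChain R (l.take 1) := by
  cases l with
  | nil => simp
  | cons a t => simpa using List.isChain_singleton a

theorem foldl_stack_start (letter : String) (l : List String) :
    l.foldl (stackStep letter) [] =
      (l.drop 1).foldl (stackStep letter) ((l.take 1).reverse) := by
  cases l with
  | nil => rfl
  | cons y r => simp [stackStep]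

theorem erase2_eq (xs : List String) (i : Nat) (h : i + 1 < xs.length) :
    (xs.eraseIdx i).eraseIdx i = xs.take i ++ xs.drop (i+2) := by
  rw [List.eraseIdx_eq_take_drop_succ, List.eraseIdx_eq_take_drop_succ]
  have hlen : (xs.take i).length = i := by simp; omega
  rw [List.take_append, List.drop_append]
  simp [hlen, List.take_take, List.drop_drop]

theorem loop_eq (letter : String) (i : Nat) (xs : List String)
    (hred : List.IsChain (noReact letter) (xs.take (i+1))) :
    reactA_loop letter i xs =
      ((xs.drop (i+1)).foldl (stackStep letter) ((xs.take (i+1)).reverse)).reverse := by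
  fun_induction reactA_loop letter i xs with
  | case1 i xs h char1 char2 hcond xs' i' ih =>
    -- reaction at (i, i+1)
    have hi : i < xs.length := by omega
    have htake : xs.take (i+1) = xs.take i ++ [xs[i]] := by
      rw [List.take_add_one]; simp [List.getElem?_eq_getElem hi]
    have hdrop : xs.drop (i+1) = xs[i+1]'h :: xs.drop (i+2) := by
      rw [List.drop_eq_getElem_cons h]
    have hstep : stackStep letter (xs[i] :: (xs.take i).reverse) (xs[i+1]'h) =
        (xs.take i).reverse := by
      simp only [stackStep]
      rw [if_pos]
      exact ⟨hcond.2.1.symm, hcond.1.symm, fun e => hcond.2.2 e.symm⟩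
    have hxs' : xs' = xs.take i ++ xs.drop (i+2) := erase2_eq xs i h
    have hfold : (xs.drop (i+1)).foldl (stackStep letter) ((xs.take (i+1)).reverse)
        = (xs.drop (i+2)).foldl (stackStep letter) ((xs.take i).reverse) := by
      rw [hdrop, htake, List.reverse_append]
      simp only [List.reverse_cons, List.reverse_nil, List.nil_append,
        List.singleton_append, List.foldl_cons, hstep]
    rw [hfold]
    have hlt : (xs.take i).length = i := by simp; omega
    by_cases hip : i > 0
    · have hi' : i' = i - 1 := by simp only [i']; split <;> omega
      have ht' : xs'.take i = xs.take i := by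
        rw [hxs', List.take_append, hlt]
        simp [List.take_take]
      have hd' : xs'.drop i = xs.drop (i+2) := by
        rw [hxs', List.drop_append, hlt]
        simp
      have hsucc : i' + 1 = i := by omega
      have hred' : List.IsChain (noReact letter) (xs'.take (i'+1)) := by
        rw [hsucc, ht']
        have hh : xs.take i = (xs.take (i+1)).take i := by
          rw [List.take_take]; congr 1; omega
        rw [hh]
        exact hred.take _
      rw [ih hred', hsucc, ht', hd']
    · have hi0 : i = 0 := by omega
      have hi' : i' = 0 := by simp only [i']; split <;> omega
      have hred' : List.IsChain (noReact letter) (xs'.take (i'+1)) := by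
        rw [hi']; exact isChain_take_one _ _
      rw [ih hred', hi', hxs', hi0]
      simp only [List.take_zero, List.nil_append, List.reverse_nil]
      rw [foldl_stack_start]
  | case2 i xs h char1 char2 hcond ih =>
    -- no reaction: advance i
    have hi : i < xs.length := by omega
    have htake1 : xs.take (i+1) = xs.take i ++ [xs[i]] := by
      rw [List.take_add_one]; simp [List.getElem?_eq_getElem hi]
    have htake2 : xs.take (i+2) = xs.take (i+1) ++ [xs[i+1]'h] := by
      rw [show i+2 = (i+1)+1 from rfl, List.take_add_one]
      simp [List.getElem?_eq_getElem h]
    have hdrop : xs.drop (i+1) = xs[i+1]'h :: xs.drop (i+2) := by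
      rw [List.drop_eq_getElem_cons h]
    have hstep : stackStep letter ((xs.take (i+1)).reverse) (xs[i+1]'h) =
        (xs.take (i+2)).reverse := by
      rw [htake2, htake1, List.reverse_append, List.reverse_append]
      simp only [List.reverse_cons, List.reverse_nil, List.nil_append,
        List.singleton_append, stackStep]
      rw [if_neg (fun hc => hcond ⟨hc.2.1.symm, hc.1.symm, fun e => hc.2.2 e.symm⟩)]
      rw [List.reverse_append]
      simp
    have hlast : (xs.take (i+1)).getLast? = some xs[i] := by
      rw [htake1, List.getLast?_concat]
    have hred' : List.IsChain (noReact letter) (xs.take (i+2)) := by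
      rw [htake2, List.isChain_append]
      refine ⟨hred, by simpa using List.isChain_singleton _, ?_⟩
      intro x hx y hy
      rw [hlast] at hx
      simp only [Option.mem_def, Option.some.injEq, List.head?_cons] at hx hy
      subst hx; subst hy
      exact hcond
    rw [ih hred', hdrop, List.foldl_cons, hstep]
  | case3 i xs h =>
    have hge : xs.length ≤ i + 1 := by omega
    simp [List.take_of_length_le hge, List.drop_eq_nil_of_le hge]

-- ===== VERDICT (by name: the statement is the Claim_ definition above) =====
theorem reactSingleLetter_spec : Claim_equal_reactSingleLetter := by
  intro letter xs _ _
  unfold Spec_reactSingleLetter reactSingleLetter reactSingleLetter_alt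
  rw [loop_eq letter 0 xs (isChain_take_one _ _), foldl_stack_start]
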